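-- pv_equiv track=rewrite | github.com/gihsism/ifrs18tool | modules/ifrs18_categories.py | classify_bs_item
-- ===== SOURCE A (Python) =====
-- from enum import Enum
--
-- class BSCategory(str, Enum):
--     NON_CURRENT_ASSETS = "Non-current Assets"
--     CURRENT_ASSETS = "Current Assets"
--     EQUITY = "Equity"
--     NON_CURRENT_LIABILITIES = "Non-current Liabilities"
--     CURRENT_LIABILITIES = "Current Liabilities"
--
-- BS_CLASSIFICATION_RULES = {
--     BSCategory.NON_CURRENT_ASSETS: [
--         "property plant", "ppe", "land and building",
--         "intangible", "goodwill", "software",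
--         "investment property", "right-of-use", "rou asset",
--         "biological asset",
--         "deferred tax asset",
--         "long-term investment", "equity investment",
--         "investment in associate", "investment in joint venture",
--         "financial asset",
--     ],
--     BSCategory.CURRENT_ASSETS: [
--         "inventory", "inventories", "stock",
--         "trade receivable", "accounts receivable",
--         "other receivable", "loan receivable",
--         "prepayment", "prepaid", "advance",
--         "contract asset",
--         "cash", "bank balance", "term deposit",
--         "short-term investment",
--         "tax receivable", "tax refund",
--     ],
--     BSCategory.EQUITY: [
--         "share capital", "ordinary share", "common stock",
--         "share premium", "additional paid-in",
--         "retained earning", "accumulated profit", "accumulated loss",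
--         "reserve", "revaluation reserve", "hedging reserve",
--         "translation reserve", "other comprehensive",
--         "oci", "treasury",
--         "non-controlling interest", "minority interest",
--     ],
--     BSCategory.NON_CURRENT_LIABILITIES: [
--         "long-term borrowing", "bond payable", "debenture",
--         "lease liabilit",
--         "deferred tax liabilit",
--         "pension liabilit", "defined benefit liabilit",
--         "defined benefit obligation",
--         "long-term payable", "other non-current liabilit",
--         "provision", "provisions",
--     ],
--     BSCategory.CURRENT_LIABILITIES: [
--         "trade payable", "accounts payable",
--         "accrual", "accrued",
--         "short-term borrowing", "overdraft",
--         "current portion",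
--         "tax payable", "income tax payable",
--         "contract liabilit", "deferred revenue", "unearned revenue",
--         "dividend payable",
--         "other payable", "other current liabilit",
--     ],
-- }
--
-- def classify_bs_item(description: str) -> BSCategory:
--     """Classify a balance sheet line item using longest-keyword-match."""
--     desc_lower = description.lower().strip()
--
--     best_cat = None
--     best_len = 0
--     for category, keywords in BS_CLASSIFICATION_RULES.items():
--         for keyword in keywords:
--             if keyword in desc_lower and len(keyword) > best_len:
--                 best_cat = category
--                 best_len = len(keyword)
--
--     if best_cat is not None:
--         return best_cat
--
--     # Fallback heuristics when no keyword matches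
--     # Check for common patterns
--     if any(w in desc_lower for w in ["asset", "receivable", "prepaid", "investment"]):
--         return BSCategory.NON_CURRENT_ASSETS
--     if any(w in desc_lower for w in ["liability", "payable", "borrowing", "debt", "loan"]):
--         return BSCategory.NON_CURRENT_LIABILITIES
--     if any(w in desc_lower for w in ["capital", "reserve", "retained", "equity", "surplus"]):
--         return BSCategory.EQUITY
--
--     # Last resort — return non-current assets (safer than current assets for unknowns)
--     return BSCategory.NON_CURRENT_ASSETS
-- ===== SOURCE B (Python) =====
-- # B: the rules are kept as one flat (keyword, category) table, stably sorted once
-- # at import by descending keyword length; classification is then the first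
-- # substring match (short-circuit), and the fallback heuristics are a
-- # data-driven loop instead of an if-chain.
--
-- _PAIRS = [
--     ("property plant", "Non-current Assets"), ("ppe", "Non-current Assets"),
--     ("land and building", "Non-current Assets"), ("intangible", "Non-current Assets"),
--     ("goodwill", "Non-current Assets"), ("software", "Non-current Assets"),
--     ("investment property", "Non-current Assets"), ("right-of-use", "Non-current Assets"),
--     ("rou asset", "Non-current Assets"), ("biological asset", "Non-current Assets"),
--     ("deferred tax asset", "Non-current Assets"), ("long-term investment", "Non-current Assets"),
--     ("equity investment", "Non-current Assets"), ("investment in associate", "Non-current Assets"),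
--     ("investment in joint venture", "Non-current Assets"), ("financial asset", "Non-current Assets"),
--     ("inventory", "Current Assets"), ("inventories", "Current Assets"),
--     ("stock", "Current Assets"), ("trade receivable", "Current Assets"),
--     ("accounts receivable", "Current Assets"), ("other receivable", "Current Assets"),
--     ("loan receivable", "Current Assets"), ("prepayment", "Current Assets"),
--     ("prepaid", "Current Assets"), ("advance", "Current Assets"),
--     ("contract asset", "Current Assets"), ("cash", "Current Assets"),
--     ("bank balance", "Current Assets"), ("term deposit", "Current Assets"),
--     ("short-term investment", "Current Assets"), ("tax receivable", "Current Assets"),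
--     ("tax refund", "Current Assets"),
--     ("share capital", "Equity"), ("ordinary share", "Equity"),
--     ("common stock", "Equity"), ("share premium", "Equity"),
--     ("additional paid-in", "Equity"), ("retained earning", "Equity"),
--     ("accumulated profit", "Equity"), ("accumulated loss", "Equity"),
--     ("reserve", "Equity"), ("revaluation reserve", "Equity"),
--     ("hedging reserve", "Equity"), ("translation reserve", "Equity"),
--     ("other comprehensive", "Equity"), ("oci", "Equity"),
--     ("treasury", "Equity"), ("non-controlling interest", "Equity"),
--     ("minority interest", "Equity"),
--     ("long-term borrowing", "Non-current Liabilities"), ("bond payable", "Non-current Liabilities"),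
--     ("debenture", "Non-current Liabilities"), ("lease liabilit", "Non-current Liabilities"),
--     ("deferred tax liabilit", "Non-current Liabilities"), ("pension liabilit", "Non-current Liabilities"),
--     ("defined benefit liabilit", "Non-current Liabilities"), ("defined benefit obligation", "Non-current Liabilities"),
--     ("long-term payable", "Non-current Liabilities"), ("other non-current liabilit", "Non-current Liabilities"),
--     ("provision", "Non-current Liabilities"), ("provisions", "Non-current Liabilities"),
--     ("trade payable", "Current Liabilities"), ("accounts payable", "Current Liabilities"),
--     ("accrual", "Current Liabilities"), ("accrued", "Current Liabilities"),
--     ("short-term borrowing", "Current Liabilities"), ("overdraft", "Current Liabilities"),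
--     ("current portion", "Current Liabilities"), ("tax payable", "Current Liabilities"),
--     ("income tax payable", "Current Liabilities"), ("contract liabilit", "Current Liabilities"),
--     ("deferred revenue", "Current Liabilities"), ("unearned revenue", "Current Liabilities"),
--     ("dividend payable", "Current Liabilities"), ("other payable", "Current Liabilities"),
--     ("other current liabilit", "Current Liabilities"),
-- ]
--
-- _SORTED_PAIRS = sorted(_PAIRS, key=lambda p: len(p[0]), reverse=True)
--
-- _FALLBACK = [
--     (["asset", "receivable", "prepaid", "investment"], "Non-current Assets"),
--     (["liability", "payable", "borrowing", "debt", "loan"], "Non-current Liabilities"),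
--     (["capital", "reserve", "retained", "equity", "surplus"], "Equity"),
-- ]
--
-- def classify_bs_item(description: str) -> str:
--     desc_lower = description.lower().strip()
--
--     for kw, cat in _SORTED_PAIRS:
--         if kw in desc_lower:
--             return cat
--
--     for words, cat in _FALLBACK:
--         if any(w in desc_lower for w in words):
--             return cat
--
--     return "Non-current Assets"
-- ===== Notes on version B (the rewrite author's own statement) =====
-- stated objective: alternative
-- what changed: B flattens the rules into one (keyword, category) table stably sorted once by descending keyword length and returns the category of the first substring match (short-circuiting), instead of A's nested scan maintaining best category/length; the fallback heuristics become a data-driven loop over (words, category) pairs.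
import Mathlib
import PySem

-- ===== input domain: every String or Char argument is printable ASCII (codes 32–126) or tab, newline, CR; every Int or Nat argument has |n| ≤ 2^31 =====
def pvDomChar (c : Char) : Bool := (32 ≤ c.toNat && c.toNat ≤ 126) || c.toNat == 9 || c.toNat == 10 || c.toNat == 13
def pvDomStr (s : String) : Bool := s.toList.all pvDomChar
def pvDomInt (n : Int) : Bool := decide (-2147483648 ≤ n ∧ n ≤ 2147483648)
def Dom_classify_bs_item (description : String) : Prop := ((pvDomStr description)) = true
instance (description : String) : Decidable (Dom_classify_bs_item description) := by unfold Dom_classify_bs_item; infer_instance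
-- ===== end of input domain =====

-- B keeps the rules as one flat (keyword, category) table stably sorted once by descending
-- keyword length, then returns the category of the first substring match, with the fallback
-- heuristics as a data-driven loop (objective: alternative decomposition).

-- ===== PORT A =====
def pvRulesA : List (String × List String) := [
  ("Non-current Assets", [
    "property plant", "ppe", "land and building",
    "intangible", "goodwill", "software",
    "investment property", "right-of-use", "rou asset",
    "biological asset",
    "deferred tax asset",
    "long-term investment", "equity investment",
    "investment in associate", "investment in joint venture",
    "financial asset"]),
  ("Current Assets", [
    "inventory", "inventories", "stock",
    "trade receivable", "accounts receivable",
    "other receivable", "loan receivable",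
    "prepayment", "prepaid", "advance",
    "contract asset",
    "cash", "bank balance", "term deposit",
    "short-term investment",
    "tax receivable", "tax refund"]),
  ("Equity", [
    "share capital", "ordinary share", "common stock",
    "share premium", "additional paid-in",
    "retained earning", "accumulated profit", "accumulated loss",
    "reserve", "revaluation reserve", "hedging reserve",
    "translation reserve", "other comprehensive",
    "oci", "treasury",
    "non-controlling interest", "minority interest"]),
  ("Non-current Liabilities", [
    "long-term borrowing", "bond payable", "debenture",
    "lease liabilit",
    "deferred tax liabilit",
    "pension liabilit", "defined benefit liabilit",
    "defined benefit obligation",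
    "long-term payable", "other non-current liabilit",
    "provision", "provisions"]),
  ("Current Liabilities", [
    "trade payable", "accounts payable",
    "accrual", "accrued",
    "short-term borrowing", "overdraft",
    "current portion",
    "tax payable", "income tax payable",
    "contract liabilit", "deferred revenue", "unearned revenue",
    "dividend payable",
    "other payable", "other current liabilit"])]

def classify_bs_item (description : String) : String :=
  let desc := PySem.Str.strip (PySem.Str.lower description)
  let st := pvRulesA.foldl (fun st ck =>
      ck.2.foldl (fun (st : Option String × Int) kw =>
        if PySem.Str.isIn kw desc && decide (st.2 < PySem.Str.len kw)
        then (some ck.1, PySem.Str.len kw) else st) st) (none, 0)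
  match st.1 with
  | some c => c
  | none =>
    if (["asset", "receivable", "prepaid", "investment"].any fun w => PySem.Str.isIn w desc) then "Non-current Assets"
    else if (["liability", "payable", "borrowing", "debt", "loan"].any fun w => PySem.Str.isIn w desc) then "Non-current Liabilities"
    else if (["capital", "reserve", "retained", "equity", "surplus"].any fun w => PySem.Str.isIn w desc) then "Equity"
    else "Non-current Assets"

-- ===== PORT B =====
-- the flat (keyword, category) rule table, in Source B's literal order
def pvPairs : List (String × String) := [
  ("property plant", "Non-current Assets"), ("ppe", "Non-current Assets"),
  ("land and building", "Non-current Assets"), ("intangible", "Non-current Assets"),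
  ("goodwill", "Non-current Assets"), ("software", "Non-current Assets"),
  ("investment property", "Non-current Assets"), ("right-of-use", "Non-current Assets"),
  ("rou asset", "Non-current Assets"), ("biological asset", "Non-current Assets"),
  ("deferred tax asset", "Non-current Assets"), ("long-term investment", "Non-current Assets"),
  ("equity investment", "Non-current Assets"), ("investment in associate", "Non-current Assets"),
  ("investment in joint venture", "Non-current Assets"), ("financial asset", "Non-current Assets"),
  ("inventory", "Current Assets"), ("inventories", "Current Assets"),
  ("stock", "Current Assets"), ("trade receivable", "Current Assets"),
  ("accounts receivable", "Current Assets"), ("other receivable", "Current Assets"),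
  ("loan receivable", "Current Assets"), ("prepayment", "Current Assets"),
  ("prepaid", "Current Assets"), ("advance", "Current Assets"),
  ("contract asset", "Current Assets"), ("cash", "Current Assets"),
  ("bank balance", "Current Assets"), ("term deposit", "Current Assets"),
  ("short-term investment", "Current Assets"), ("tax receivable", "Current Assets"),
  ("tax refund", "Current Assets"), ("share capital", "Equity"),
  ("ordinary share", "Equity"), ("common stock", "Equity"),
  ("share premium", "Equity"), ("additional paid-in", "Equity"),
  ("retained earning", "Equity"), ("accumulated profit", "Equity"),
  ("accumulated loss", "Equity"), ("reserve", "Equity"),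
  ("revaluation reserve", "Equity"), ("hedging reserve", "Equity"),
  ("translation reserve", "Equity"), ("other comprehensive", "Equity"),
  ("oci", "Equity"), ("treasury", "Equity"),
  ("non-controlling interest", "Equity"), ("minority interest", "Equity"),
  ("long-term borrowing", "Non-current Liabilities"), ("bond payable", "Non-current Liabilities"),
  ("debenture", "Non-current Liabilities"), ("lease liabilit", "Non-current Liabilities"),
  ("deferred tax liabilit", "Non-current Liabilities"), ("pension liabilit", "Non-current Liabilities"),
  ("defined benefit liabilit", "Non-current Liabilities"), ("defined benefit obligation", "Non-current Liabilities"),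
  ("long-term payable", "Non-current Liabilities"), ("other non-current liabilit", "Non-current Liabilities"),
  ("provision", "Non-current Liabilities"), ("provisions", "Non-current Liabilities"),
  ("trade payable", "Current Liabilities"), ("accounts payable", "Current Liabilities"),
  ("accrual", "Current Liabilities"), ("accrued", "Current Liabilities"),
  ("short-term borrowing", "Current Liabilities"), ("overdraft", "Current Liabilities"),
  ("current portion", "Current Liabilities"), ("tax payable", "Current Liabilities"),
  ("income tax payable", "Current Liabilities"), ("contract liabilit", "Current Liabilities"),
  ("deferred revenue", "Current Liabilities"), ("unearned revenue", "Current Liabilities"),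
  ("dividend payable", "Current Liabilities"), ("other payable", "Current Liabilities"),
  ("other current liabilit", "Current Liabilities")]

-- sorted(_PAIRS, key=lambda p: len(p[0]), reverse=True) — stable, Python's reverse rule
def pvSortedPairsB : List (String × String) :=
  PySem.List.sorted pvPairs (fun p => PySem.Str.len p.1) true

def pvFallback : List (List String × String) := [
  (["asset", "receivable", "prepaid", "investment"], "Non-current Assets"),
  (["liability", "payable", "borrowing", "debt", "loan"], "Non-current Liabilities"),
  (["capital", "reserve", "retained", "equity", "surplus"], "Equity")]

def classify_bs_item_alt (description : String) : String :=
  let desc := PySem.Str.strip (PySem.Str.lower description)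
  match pvSortedPairsB.find? (fun p => PySem.Str.isIn p.1 desc) with
  | some p => p.2
  | none =>
    match pvFallback.find? (fun wc => wc.1.any fun w => PySem.Str.isIn w desc) with
    | some wc => wc.2
    | none => "Non-current Assets"

-- ===== PRECONDITION & SPEC =====
def Spec_classify_bs_item (description : String) (out : String) : Prop := out = classify_bs_item_alt description
instance (description : String) (out : String) : Decidable (Spec_classify_bs_item description out) := by unfold Spec_classify_bs_item; infer_instance

-- ===== CLAIM (what is proved, stated in full; the proofs are below) =====
def Claim_equal_classify_bs_item : Prop := ∀ (description : String), Dom_classify_bs_item description → Spec_classify_bs_item description (classify_bs_item description)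

-- ===== LEMMAS AND PROOFS =====

-- keyword length of a (keyword, category) pair
def pvKLen (p : String × String) : Int := PySem.Str.len p.1

def pvOLen : Option (String × String) → Int
  | none => 0
  | some p => pvKLen p

theorem pv_klen_nonneg (p : String × String) : 0 ≤ pvKLen p := by
  simp [pvKLen, PySem.Str.len_eq]

-- the first pair of maximal keyword length satisfying m (none if no pair does)
def pvBest0 (m : String × String → Bool) : List (String × String) → Option (String × String)
  | [] => none
  | p :: t =>
    if m p && decide (pvOLen (pvBest0 m t) ≤ pvKLen p) then some p else pvBest0 m t

-- insertion (stable, descending keyword length) — proof-side model of the sort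
def pvIns (p : String × String) : List (String × String) → List (String × String)
  | [] => [p]
  | q :: r => if pvKLen p < pvKLen q then q :: pvIns p r else p :: q :: r

def pvInsSort : List (String × String) → List (String × String)
  | [] => []
  | p :: t => pvIns p (pvInsSort t)

theorem pv_mem_ins (x p : String × String) (l : List (String × String)) :
    x ∈ pvIns p l ↔ x = p ∨ x ∈ l := by
  induction l with
  | nil => simp [pvIns]
  | cons q r ih =>
    by_cases h : pvKLen p < pvKLen q <;> (simp [pvIns, h, ih]; try tauto)

theorem pv_pairwise_ins (p : String × String) (l : List (String × String)) :
    (l.Pairwise fun a b => pvKLen b ≤ pvKLen a) →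
    (pvIns p l).Pairwise fun a b => pvKLen b ≤ pvKLen a := by
  induction l with
  | nil => intro _; simp [pvIns]
  | cons q r ih =>
    intro h
    rw [List.pairwise_cons] at h
    obtain ⟨hq, hr⟩ := h
    by_cases hlt : pvKLen p < pvKLen q
    · simp only [pvIns, if_pos hlt]
      refine List.Pairwise.cons ?_ (ih hr)
      intro x hx
      rcases (pv_mem_ins x p r).1 hx with rfl | hx
      · omega
      · exact hq x hx
    · simp only [pvIns, if_neg hlt]
      refine List.Pairwise.cons ?_ (List.Pairwise.cons hq hr)
      intro x hx
      rcases List.mem_cons.mp hx with rfl | hx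
      · omega
      · have := hq x hx; omega

theorem pv_pairwise_insSort (l : List (String × String)) :
    (pvInsSort l).Pairwise fun a b => pvKLen b ≤ pvKLen a := by
  induction l with
  | nil => simp [pvInsSort]
  | cons p t ih => exact pv_pairwise_ins p _ ih

theorem pv_find_ins (m : String × String → Bool) (l : List (String × String)) :
    (l.Pairwise fun a b => pvKLen b ≤ pvKLen a) → ∀ p : String × String,
    (pvIns p l).find? m
      = if m p && decide (pvOLen (l.find? m) ≤ pvKLen p) then some p else l.find? m := by
  induction l with
  | nil =>
    intro _ p
    by_cases hm : m p = true
    · simp [pvIns, hm, pvOLen, pv_klen_nonneg p]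
    · simp [pvIns, hm]
  | cons q r ih =>
    intro h p
    rw [List.pairwise_cons] at h
    obtain ⟨hq, hr⟩ := h
    by_cases hlt : pvKLen p < pvKLen q
    · simp only [pvIns, if_pos hlt]
      by_cases hmq : m q = true
      · rw [List.find?_cons_of_pos (by exact hmq), List.find?_cons_of_pos (by exact hmq)]
        rw [if_neg (by simp [pvOLen]; omega)]
      · rw [List.find?_cons_of_neg (by simp [hmq]), List.find?_cons_of_neg (by simp [hmq])]
        exact ih hr p
    · simp only [pvIns, if_neg hlt]
      by_cases hmp : m p = true
      · have hle : pvOLen ((q :: r).find? m) ≤ pvKLen p := by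
          rcases hfind : (q :: r).find? m with _ | x
          · simpa [pvOLen] using pv_klen_nonneg p
          · have hx := List.mem_of_find?_eq_some hfind
            rcases List.mem_cons.mp hx with rfl | hx
            · simp only [pvOLen]; omega
            · have := hq x hx
              simp only [pvOLen]; omega
        rw [List.find?_cons_of_pos (by exact hmp)]
        rw [if_pos (by simp [hmp, hle])]
      · rw [List.find?_cons_of_neg (by simp [hmp])]
        rw [if_neg (by simp [hmp])]

theorem pv_find_insSort (m : String × String → Bool) (l : List (String × String)) :
    (pvInsSort l).find? m = pvBest0 m l := by
  induction l with
  | nil => simp [pvInsSort, pvBest0]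
  | cons p t ih =>
    simp only [pvInsSort, pvBest0]
    rw [pv_find_ins m _ (pv_pairwise_insSort t) p, ih]

theorem pv_best0_mem (m : String × String → Bool) (l : List (String × String))
    (q : String × String) (h : pvBest0 m l = some q) : q ∈ l := by
  induction l with
  | nil => simp [pvBest0] at h
  | cons p t ih =>
    simp only [pvBest0] at h
    split at h
    · cases h; exact List.mem_cons_self
    · simp [ih h]

-- A's nested fold over (category, keywords) equals the flat fold over the flattened pairs
theorem pv_foldl_rules (s : String) (rules : List (String × List String))
    (init : Option String × Int) :
    rules.foldl (fun st ck =>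
        ck.2.foldl (fun (st : Option String × Int) kw =>
          if PySem.Str.isIn kw s && decide (st.2 < PySem.Str.len kw)
          then (some ck.1, PySem.Str.len kw) else st) st) init
      = (rules.flatMap fun ck => ck.2.map fun kw => (kw, ck.1)).foldl
          (fun (st : Option String × Int) p =>
            if PySem.Str.isIn p.1 s && decide (st.2 < PySem.Str.len p.1)
            then (some p.2, PySem.Str.len p.1) else st) init := by
  induction rules generalizing init with
  | nil => rfl
  | cons ck rest ih =>
    simp only [List.flatMap_cons, List.foldl_append, List.foldl_cons, List.foldl_map, ih]

-- A's flat fold computed by pvBest0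
theorem pv_foldl_best (m : String × String → Bool) (t : List (String × String))
    (b : Option String) (bl : Int) :
    t.foldl (fun (st : Option String × Int) p =>
        if m p && decide (st.2 < PySem.Str.len p.1)
        then (some p.2, PySem.Str.len p.1) else st) (b, bl)
      = match (if bl < pvOLen (pvBest0 m t) then pvBest0 m t else none) with
        | some q => (some q.2, pvKLen q)
        | none => (b, bl) := by
  have hk : ∀ p : String × String, PySem.Str.len p.1 = pvKLen p := fun _ => rfl
  simp only [hk]
  induction t generalizing b bl with
  | nil => simp [pvBest0, pvOLen]
  | cons p t ih =>
    simp only [List.foldl_cons, pvBest0]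
    by_cases hm : m p = true
    · by_cases hlt : bl < pvKLen p
      · rw [if_pos (show (m p && decide (bl < pvKLen p)) = true by simp [hm, hlt])]
        rw [ih]
        by_cases hle : pvOLen (pvBest0 m t) ≤ pvKLen p
        · rw [if_neg (show ¬ pvKLen p < pvOLen (pvBest0 m t) by omega)]
          rw [if_pos (show (m p && decide (pvOLen (pvBest0 m t) ≤ pvKLen p)) = true by simp [hm, hle])]
          rw [if_pos (show bl < pvOLen (some p) by simp only [pvOLen]; omega)]
        · rcases hb : pvBest0 m t with _ | x
          · rw [hb] at hle
            exact absurd (by simpa [pvOLen] using pv_klen_nonneg p) hle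
          · rw [hb] at hle
            have hx : pvKLen p < pvKLen x := by simp only [pvOLen] at hle; omega
            rw [if_pos (show pvKLen p < pvOLen (some x) by simp only [pvOLen]; omega)]
            rw [if_neg (show ¬ (m p && decide (pvOLen (some x) ≤ pvKLen p)) = true by
              simp [hm, pvOLen]; omega)]
            rw [if_pos (show bl < pvOLen (some x) by simp only [pvOLen]; omega)]
      · rw [if_neg (show ¬ (m p && decide (bl < pvKLen p)) = true by simp [hm, hlt])]
        rw [ih]
        by_cases hle : pvOLen (pvBest0 m t) ≤ pvKLen p
        · rw [if_neg (show ¬ bl < pvOLen (pvBest0 m t) by omega)]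
          rw [if_pos (show (m p && decide (pvOLen (pvBest0 m t) ≤ pvKLen p)) = true by simp [hm, hle])]
          rw [if_neg (show ¬ bl < pvOLen (some p) by simp only [pvOLen]; omega)]
        · rw [if_neg (show ¬ (m p && decide (pvOLen (pvBest0 m t) ≤ pvKLen p)) = true by
            simp [hm, hle])]
    · rw [if_neg (show ¬ (m p && decide (bl < pvKLen p)) = true by simp [hm]),
        if_neg (show ¬ (m p && decide (pvOLen (pvBest0 m t) ≤ pvKLen p)) = true by simp [hm])]
      exact ih b bl

-- B's flat table is exactly the flattening of A's grouped rules
set_option maxRecDepth 4000 in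
theorem pv_pairsA_eq : (pvRulesA.flatMap fun ck => ck.2.map fun kw => (kw, ck.1)) = pvPairs := by
  decide

-- the concrete sorted list equals the proof-side stable insertion sort of the pairs
set_option maxRecDepth 4000 in
set_option maxHeartbeats 1000000 in
theorem pv_sorted_eq : pvSortedPairsB = pvInsSort pvPairs := by decide

set_option maxRecDepth 4000 in
theorem pv_klen_pos : ∀ q ∈ pvPairs, 0 < pvKLen q := by decide

-- A's fallback if-chain equals B's data-driven scan of pvFallback
theorem pv_fallback_eq (desc : String) :
    (if (["asset", "receivable", "prepaid", "investment"].any fun w => PySem.Str.isIn w desc) then "Non-current Assets"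
     else if (["liability", "payable", "borrowing", "debt", "loan"].any fun w => PySem.Str.isIn w desc) then "Non-current Liabilities"
     else if (["capital", "reserve", "retained", "equity", "surplus"].any fun w => PySem.Str.isIn w desc) then "Equity"
     else "Non-current Assets")
    = match pvFallback.find? (fun wc => wc.1.any fun w => PySem.Str.isIn w desc) with
      | some wc => wc.2
      | none => "Non-current Assets" := by
  cases h1 : (["asset", "receivable", "prepaid", "investment"].any fun w => PySem.Str.isIn w desc) <;>
    cases h2 : (["liability", "payable", "borrowing", "debt", "loan"].any fun w => PySem.Str.isIn w desc) <;>
      cases h3 : (["capital", "reserve", "retained", "equity", "surplus"].any fun w => PySem.Str.isIn w desc) <;>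
        simp only [pvFallback, List.find?_cons, h1, h2, h3] <;> rfl

-- ===== VERDICT (by name: the statement is the Claim_ definition above) =====
theorem classify_bs_item_spec : Claim_equal_classify_bs_item := by
  intro description _
  unfold Spec_classify_bs_item classify_bs_item classify_bs_item_alt
  simp only [pv_foldl_rules, pv_pairsA_eq, pv_sorted_eq, pv_find_insSort, pv_foldl_best]
  rcases hb : pvBest0
      (fun p => PySem.Str.isIn p.1 (PySem.Str.strip (PySem.Str.lower description))) pvPairs
    with _ | q
  · simpa [pvOLen] using pv_fallback_eq (PySem.Str.strip (PySem.Str.lower description))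
  · have hq := pv_klen_pos q (pv_best0_mem _ _ _ hb)
    simp [pvOLen, hq]
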